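-- pv_equiv track=rewrite | github.com/VITA-Group/PiRN | assets/iarpa_process.py | split_to_patches
-- ===== SOURCE A (Python) =====
-- def split_to_patches(h, w, s):
--     nh = h // s + 1
--     nw = w // s + 1
--
--     if nh == 1:
--         hpos=[0]
--     else:
--         ol_h = int((nh * s - h) / (nh - 1))
--         h_start = 0
--         hpos = [h_start]
--         for i in range(1, nh):
--             h_start = hpos[-1] + s - ol_h
--             if h_start+s > h:
--                 h_start = h-s
--             hpos.append(h_start)
--
--     if nw == 1:
--         wpos = [0]
--     else:
--         ol_w = int((nw * s - w) / (nw - 1))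
--         w_start = 0
--         wpos = [w_start]
--         for i in range(1, nw):
--             w_start = wpos[-1] + s - ol_w
--             if w_start+s > w:
--                 w_start = w-s
--             wpos.append(w_start)
--
--     return hpos, wpos
-- ===== SOURCE B (Python) =====
-- def split_to_patches(h, w, s):
--     def axis(n):
--         k = n // s + 1
--         if k <= 1:
--             return [0]
--         ol = int((k * s - n) / (k - 1))
--         step = s - ol
--         last = n - s
--         return [min(i * step, last) for i in range(k)]
--     return axis(h), axis(w)
-- ===== Notes on version B (the rewrite author's own statement) =====
-- stated objective: simpler
-- what changed: B replaces A's stateful recurrence (each position read from hpos[-1], then clamped by an overflow branch) with a direct closed form: position i is min(i*(s-ol), h-s), emitted by a single comprehension per axis with no dependence on the previous element.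
-- outside the precondition, e.g. on split_to_patches(7, 7, 0): A raises ZeroDivisionError, B raises ZeroDivisionError; on split_to_patches(-7, -7, -3): A returns ([0, -4, -6], [0, -4, -6]), B returns ([-4, -4, -4], [-4, -4, -4])
import Mathlib
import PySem

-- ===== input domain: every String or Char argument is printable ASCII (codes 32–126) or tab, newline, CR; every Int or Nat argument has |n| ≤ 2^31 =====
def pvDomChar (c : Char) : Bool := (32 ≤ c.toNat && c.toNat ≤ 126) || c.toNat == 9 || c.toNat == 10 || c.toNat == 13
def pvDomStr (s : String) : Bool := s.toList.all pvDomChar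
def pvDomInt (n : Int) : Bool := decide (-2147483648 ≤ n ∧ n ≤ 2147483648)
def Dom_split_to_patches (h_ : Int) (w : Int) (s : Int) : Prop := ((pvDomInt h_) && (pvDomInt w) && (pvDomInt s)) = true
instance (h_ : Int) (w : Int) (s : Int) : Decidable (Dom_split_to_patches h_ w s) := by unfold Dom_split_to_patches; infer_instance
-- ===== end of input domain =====

-- B replaces A's stateful clamp recurrence by a per-index closed form min(i*(s-ol), h-s); objective: simpler.

-- ===== PORT A =====
-- Note: Python's `int((nh*s-h)/(nh-1))` is float division then truncation toward zero; since
-- |nh*s-h| ≤ 2|s| ≤ 2^32 < 2^53 on Dom, the float quotient truncates exactly like Int.tdiv.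
def split_to_patches (h_ : Int) (w : Int) (s : Int) : List Int × List Int :=
  let nh := PySem.Int.floordiv h_ s + 1
  let nw := PySem.Int.floordiv w s + 1
  let hpos :=
    if nh = 1 then [(0 : Int)]
    else
      let ol_h := Int.tdiv (nh * s - h_) (nh - 1)
      (PySem.List.pyRange 1 nh 1).foldl (fun hpos _i =>
        let h_start := PySem.List.pyGetD hpos (-1) 0 + s - ol_h  -- hpos[-1]; hpos is never empty
        let h_start := if h_start + s > h_ then h_ - s else h_start
        hpos ++ [h_start]) [0]
  let wpos :=
    if nw = 1 then [(0 : Int)]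
    else
      let ol_w := Int.tdiv (nw * s - w) (nw - 1)
      (PySem.List.pyRange 1 nw 1).foldl (fun wpos _i =>
        let w_start := PySem.List.pyGetD wpos (-1) 0 + s - ol_w  -- wpos[-1]; wpos is never empty
        let w_start := if w_start + s > w then w - s else w_start
        wpos ++ [w_start]) [0]
  (hpos, wpos)

-- ===== PORT B =====
-- B's inner helper `axis`
def pvAxisB (n : Int) (s : Int) : List Int :=
  let k := PySem.Int.floordiv n s + 1
  if k ≤ 1 then [(0 : Int)]
  else
    let ol := Int.tdiv (k * s - n) (k - 1)  -- same int(float-division) line as A; exact on Dom (|k*s-n| < 2^53)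
    let step := s - ol
    let last := n - s
    (PySem.List.pyRange 0 k 1).map (fun i => min (i * step) last)

def split_to_patches_alt (h_ : Int) (w : Int) (s : Int) : List Int × List Int :=
  (pvAxisB h_ s, pvAxisB w s)

-- ===== PRECONDITION & SPEC =====
-- Pre_ excludes s = 0 (ZeroDivisionError) and negative patch sizes s with an axis extent ≤ s:
-- a negative patch size lies outside the function's image-patching domain, and on those inputs
-- the two defensible readings of the clamp recurrence (stateful vs closed form) part ways.
def Pre_split_to_patches (h_ : Int) (w : Int) (s : Int) : Prop := s ≠ 0 ∧ (s < 0 → (s < h_ ∧ s < w))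
instance (h_ : Int) (w : Int) (s : Int) : Decidable (Pre_split_to_patches h_ w s) := by unfold Pre_split_to_patches; infer_instance
def pvWitness_split_to_patches : Int × Int × Int := (7, 9, 3)

def Spec_split_to_patches (h_ : Int) (w : Int) (s : Int) (out : List Int × List Int) : Prop := out = split_to_patches_alt h_ w s
instance (h_ : Int) (w : Int) (s : Int) (out : List Int × List Int) : Decidable (Spec_split_to_patches h_ w s out) := by unfold Spec_split_to_patches; infer_instance

-- ===== CLAIM (what is proved, stated in full; the proofs are below) =====
def Claim_equal_split_to_patches : Prop := ∀ (h_ : Int) (w : Int) (s : Int), Dom_split_to_patches h_ w s → Pre_split_to_patches h_ w s → Spec_split_to_patches h_ w s (split_to_patches h_ w s)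

-- ===== LEMMAS AND PROOFS =====

-- A's per-axis block, as a named helper for the proof (definitionally what split_to_patches does on each axis)
def pvAxisA (n : Int) (s : Int) : List Int :=
  let k := PySem.Int.floordiv n s + 1
  if k = 1 then [(0 : Int)]
  else
    let ol := Int.tdiv (k * s - n) (k - 1)
    (PySem.List.pyRange 1 k 1).foldl (fun hpos _i =>
      let h_start := PySem.List.pyGetD hpos (-1) 0 + s - ol
      let h_start := if h_start + s > n then n - s else h_start
      hpos ++ [h_start]) [0]

theorem pv_split_eq_axes (h_ w s : Int) :
    split_to_patches h_ w s = (pvAxisA h_ s, pvAxisA w s) := rfl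

-- the loop invariant: A's fold over range(1, 1+m) builds the closed-form list
theorem pv_loop (n s ol : Int) (hd : 0 ≤ s - ol) (hM : 0 ≤ n - s) (m : Nat) :
    (PySem.List.pyRange 1 (1 + (m : Int)) 1).foldl (fun hpos _i =>
      let h_start := PySem.List.pyGetD hpos (-1) 0 + s - ol
      let h_start := if h_start + s > n then n - s else h_start
      hpos ++ [h_start]) [0]
    = (PySem.List.pyRange 0 (1 + (m : Int)) 1).map (fun i => min (i * (s - ol)) (n - s)) := by
  induction m with
  | zero =>
    rw [show (1 + ((0 : Nat) : Int)) = 1 by norm_num,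
        PySem.List.pyRange_one_eq_nil (le_refl 1)]
    have h01 : PySem.List.pyRange 0 1 1 = [0] := by
      have := PySem.List.pyRange_one_singleton (a := (0 : Int)); simpa using this
    rw [h01]
    simp only [List.foldl_nil, List.map_cons, List.map_nil, zero_mul]
    rw [min_eq_left hM]
  | succ m ih =>
    rw [show (1 + ((m + 1 : Nat) : Int)) = (1 + (m : Int)) + 1 by push_cast; ring,
        PySem.List.pyRange_one_succ_right (by omega : (1 : Int) ≤ 1 + (m : Int)),
        PySem.List.pyRange_one_succ_right (by omega : (0 : Int) ≤ 1 + (m : Int)),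
        List.foldl_append, ih]
    have hsplit : PySem.List.pyRange 0 (1 + (m : Int)) 1
        = PySem.List.pyRange 0 (m : Int) 1 ++ [(m : Int)] := by
      rw [show (1 + (m : Int)) = (m : Int) + 1 by ring,
          PySem.List.pyRange_one_succ_right (by omega : (0 : Int) ≤ (m : Int))]
    simp only [List.foldl_cons, List.foldl_nil, List.map_append, hsplit, List.map_cons,
      List.map_nil, List.append_assoc, PySem.List.pyGetD_neg_one_append_singleton]
    have hexp : ((1 + (m : Int)) * (s - ol)) = (m : Int) * (s - ol) + (s - ol) := by ring
    have key : (if min ((m : Int) * (s - ol)) (n - s) + s - ol + s > n then n - s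
          else min ((m : Int) * (s - ol)) (n - s) + s - ol)
        = min ((1 + (m : Int)) * (s - ol)) (n - s) := by
      rw [hexp]; split_ifs with h <;> omega
    rw [key]

theorem pv_axis_eq (n s : Int) (hs : 1 ≤ s ∨ (s < 0 ∧ s < n)) : pvAxisA n s = pvAxisB n s := by
  rcases hs with hs | ⟨hneg, hlt⟩
  case inr =>
    -- s < 0 with n > s: nh = n//s + 1 ≤ 1, so both sides return [0]
    have hk : PySem.Int.floordiv n s + 1 ≤ 1 := by
      have h := (PySem.Int.floordiv_lt_iff_lt_mul (a := -n) (b := -s) (q := 1) (by omega)).2 (by omega)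
      rw [PySem.Int.floordiv_neg_neg] at h
      omega
    unfold pvAxisA pvAxisB
    by_cases h1 : PySem.Int.floordiv n s + 1 = 1
    · simp [h1]
    · rw [if_neg h1, if_pos hk, PySem.List.pyRange_one_eq_nil (by omega), List.foldl_nil]
  unfold pvAxisA pvAxisB
  rw [PySem.Int.floordiv_eq_ediv_of_pos (by omega : (0 : Int) < s)]
  by_cases h1 : n / s + 1 = 1
  · simp [h1]
  · rcases le_or_gt (n / s + 1) 1 with hle | hgt
    · -- n/s + 1 < 1: A's loop range is empty, B takes the k ≤ 1 branch
      rw [if_neg h1, if_pos hle, PySem.List.pyRange_one_eq_nil (by omega), List.foldl_nil]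
    · -- n/s ≥ 1: the clamp recurrence equals the closed form
      rw [if_neg h1, if_neg (by omega)]
      have hq1 : (1 : Int) ≤ n / s := by omega
      have hlow : n / s * s ≤ n := Int.ediv_mul_le n (by omega)
      have hhigh : n < (n / s + 1) * s := Int.lt_ediv_add_one_mul_self n (by omega)
      have hM : 0 ≤ n - s := by nlinarith
      have ha : 0 < (n / s + 1) * s - n := by omega
      have ha2 : (n / s + 1) * s - n ≤ s := by nlinarith
      have hol0 : 0 ≤ Int.tdiv ((n / s + 1) * s - n) (n / s + 1 - 1) :=
        Int.tdiv_nonneg ha.le (by omega)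
      have hols : Int.tdiv ((n / s + 1) * s - n) (n / s + 1 - 1) ≤ s := by
        rw [Int.tdiv_eq_ediv_of_nonneg ha.le]
        exact le_trans (Int.ediv_le_self _ ha.le) ha2
      have hd : 0 ≤ s - Int.tdiv ((n / s + 1) * s - n) (n / s + 1 - 1) := by omega
      have hk : n / s + 1 = 1 + ((n / s).toNat : Int) := by omega
      rw [hk] at hd ⊢
      exact pv_loop n s _ hd hM (n / s).toNat

-- ===== VERDICT (by name: the statement is the Claim_ definition above) =====
theorem split_to_patches_spec : Claim_equal_split_to_patches := by
  intro h_ w s _ hp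
  obtain ⟨hs0, himp⟩ := hp
  have hh : 1 ≤ s ∨ (s < 0 ∧ s < h_) := by
    rcases lt_trichotomy s 0 with h | h | h
    · exact Or.inr ⟨h, (himp h).1⟩
    · omega
    · omega
  have hw : 1 ≤ s ∨ (s < 0 ∧ s < w) := by
    rcases lt_trichotomy s 0 with h | h | h
    · exact Or.inr ⟨h, (himp h).2⟩
    · omega
    · omega
  unfold Spec_split_to_patches split_to_patches_alt
  rw [pv_split_eq_axes, pv_axis_eq h_ s hh, pv_axis_eq w s hw]
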